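-- pv_equiv track=rewrite | github.com/dogunyoye/advent-of-code-2025 | day06/day06.py | part_one
-- ===== SOURCE A (Python) =====
-- from math import prod
--
-- def __generate_grid(data) -> list:
--     grid = []
--     for line in data.splitlines():
--         row = line.split()
--         grid.append(row)
--     return grid
--
-- def part_one(data) -> int:
--     result = 0
--     grid = __generate_grid(data)
--     length, depth = len(grid[0]), len(grid)
--
--     for i in range(length):
--         nums = []
--         for j in range(depth-1):
--             nums.append(int(grid[j][i]))
--         if grid[depth-1][i] == "*":
--             result += prod(nums)
--         else:
--             result += sum(nums)
--     return result
-- ===== SOURCE B (Python) =====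
-- def part_one(data) -> int:
--     grid = [line.split() for line in data.splitlines()]
--     length, depth = len(grid[0]), len(grid)
--     sums, prods = [0] * length, [1] * length
--     for j in range(depth - 1):
--         vals = [int(grid[j][i]) for i in range(length)]
--         sums = [s + v for s, v in zip(sums, vals)]
--         prods = [p * v for p, v in zip(prods, vals)]
--     last = grid[depth - 1]
--     total = 0
--     for i in range(length):
--         total += prods[i] if last[i] == "*" else sums[i]
--     return total
-- ===== Notes on version B (the rewrite author's own statement) =====
-- stated objective: alternative
-- what changed: A collects each column into a fresh list (column-major, one list per column) and then sums or multiplies it; B makes a single row-major pass maintaining running per-column sums and products (initialised to 0/1) and finally picks sums[i] or prods[i] by the operator row.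
import Mathlib
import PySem

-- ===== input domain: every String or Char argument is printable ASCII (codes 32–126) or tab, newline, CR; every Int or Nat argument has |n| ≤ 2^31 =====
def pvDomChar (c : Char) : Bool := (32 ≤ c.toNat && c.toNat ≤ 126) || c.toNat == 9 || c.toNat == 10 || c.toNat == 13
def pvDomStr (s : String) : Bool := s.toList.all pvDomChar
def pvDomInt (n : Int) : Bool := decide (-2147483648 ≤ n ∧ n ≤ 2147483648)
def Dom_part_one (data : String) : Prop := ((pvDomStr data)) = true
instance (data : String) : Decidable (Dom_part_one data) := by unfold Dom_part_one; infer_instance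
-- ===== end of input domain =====

-- B replaces A's column-major per-column collection (build nums for each column, then sum/prod)
-- by a single row-major pass maintaining running column sums and products; objective: alternative decomposition.

-- ===== PORT A =====
-- __generate_grid: loop appending line.split() rows
def pvGenerateGrid (data : String) : List (List String) :=
  (PySem.Str.splitlines data).foldl (fun grid line => grid ++ [PySem.Str.split₀ line]) []

def part_one (data : String) : Int :=
  let grid := pvGenerateGrid data
  let length := PySem.List.len (PySem.List.pyGetD grid 0 [])
  let depth := PySem.List.len grid
  (PySem.List.pyRange 0 length 1).foldl (fun result i =>
    let nums := (PySem.List.pyRange 0 (depth - 1) 1).foldl (fun nums j =>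
      nums ++ [(PySem.Int.ofStr? (PySem.List.pyGetD (PySem.List.pyGetD grid j []) i "")).getD 0]) []
    if PySem.List.pyGetD (PySem.List.pyGetD grid (depth - 1) []) i "" == "*" then
      result + nums.prod
    else
      result + nums.sum) 0

-- ===== PORT B =====
def part_one_alt (data : String) : Int :=
  let grid := (PySem.Str.splitlines data).map PySem.Str.split₀
  let length := PySem.List.len (PySem.List.pyGetD grid 0 [])
  let depth := PySem.List.len grid
  let sp := (PySem.List.pyRange 0 (depth - 1) 1).foldl (fun sp j =>
      (List.zipWith (· + ·) sp.1 ((PySem.List.pyRange 0 length 1).map (fun i =>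
         (PySem.Int.ofStr? (PySem.List.pyGetD (PySem.List.pyGetD grid j []) i "")).getD 0)),
       List.zipWith (· * ·) sp.2 ((PySem.List.pyRange 0 length 1).map (fun i =>
         (PySem.Int.ofStr? (PySem.List.pyGetD (PySem.List.pyGetD grid j []) i "")).getD 0))))
    (List.replicate length.toNat 0, List.replicate length.toNat 1)
  let last := PySem.List.pyGetD grid (depth - 1) []
  (PySem.List.pyRange 0 length 1).foldl (fun total i =>
    total + (if PySem.List.pyGetD last i "" == "*" then PySem.List.pyGetD sp.2 i 0
             else PySem.List.pyGetD sp.1 i 0)) 0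

-- ===== PRECONDITION & SPEC =====
-- Pre_ excludes exactly the inputs where the Python A raises: an empty grid (grid[0] → IndexError),
-- a row shorter than the first row (IndexError), or a non-last-row cell among the first len(grid[0])
-- tokens that int() cannot parse (ValueError).
def Pre_part_one (data : String) : Prop :=
  let grid := (PySem.Str.splitlines data).map PySem.Str.split₀
  let L := (grid.headD []).length
  grid ≠ [] ∧ (∀ r ∈ grid, L ≤ r.length) ∧
    (∀ r ∈ grid.dropLast, ∀ s ∈ r.take L, (PySem.Int.ofStr? s).isSome)
instance (data : String) : Decidable (Pre_part_one data) := by unfold Pre_part_one; infer_instance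

def pvWitness_part_one : String := "1 2\n3 4\n+ *"

def Spec_part_one (data : String) (out : Int) : Prop := out = part_one_alt data
instance (data : String) (out : Int) : Decidable (Spec_part_one data out) := by unfold Spec_part_one; infer_instance

-- ===== CLAIM (what is proved, stated in full; the proofs are below) =====
def Claim_equal_part_one : Prop := ∀ (data : String), Dom_part_one data → Pre_part_one data → Spec_part_one data (part_one data)

-- ===== LEMMAS AND PROOFS =====

lemma pvGenerateGrid_eq (data : String) :
    pvGenerateGrid data = (PySem.Str.splitlines data).map PySem.Str.split₀ := by
  unfold pvGenerateGrid
  rw [PySem.List.foldl_append_singleton_eq_map, List.nil_append]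

lemma pv_zipWith_map_same (op : Int → Int → Int) (g h : Int → Int) (l : List Int) :
    List.zipWith op (l.map g) (l.map h) = l.map (fun x => op (g x) (h x)) := by
  rw [List.zipWith_map, List.zipWith_self]

-- a row-major fold of per-row zipWith updates is the list of per-column folds
lemma pv_fold_col (rs : List Int) (L : Int) (op : Int → Int → Int) (v : Int → Int → Int)
    (g : Int → Int) :
    rs.foldl (fun s j => List.zipWith op s ((PySem.List.pyRange 0 L 1).map (fun i => v j i)))
      ((PySem.List.pyRange 0 L 1).map g)
    = (PySem.List.pyRange 0 L 1).map (fun i => rs.foldl (fun a j => op a (v j i)) (g i)) := by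
  induction rs generalizing g with
  | nil => rfl
  | cons r t ih =>
      simp only [List.foldl_cons]
      rw [pv_zipWith_map_same, ih (fun i => op (g i) (v r i))]

lemma pv_replicate_eq (L : Int) (c : Int) :
    List.replicate L.toNat c = (PySem.List.pyRange 0 L 1).map (fun _ => c) := by
  rw [List.map_const', PySem.List.length_pyRange_one, Int.sub_zero]

lemma pv_foldl_add_ite (l : List Int) (c : Int → Bool) (P S : Int → Int) (a : Int) :
    l.foldl (fun r i => if c i then r + P i else r + S i) a
    = a + (l.map (fun i => if c i then P i else S i)).sum := by
  rw [← PySem.List.foldl_add]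
  apply PySem.List.foldl_congr_mem
  intro acc x _
  by_cases h : c x <;> simp [h]

lemma pv_pair_fold (G : List (List String)) (L : Int) (rs : List Int) (a b : List Int) :
    rs.foldl (fun sp j =>
      (List.zipWith (· + ·) sp.1 ((PySem.List.pyRange 0 L 1).map (fun i =>
         (PySem.Int.ofStr? (PySem.List.pyGetD (PySem.List.pyGetD G j []) i "")).getD 0)),
       List.zipWith (· * ·) sp.2 ((PySem.List.pyRange 0 L 1).map (fun i =>
         (PySem.Int.ofStr? (PySem.List.pyGetD (PySem.List.pyGetD G j []) i "")).getD 0)))) (a, b)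
    = (rs.foldl (fun s j => List.zipWith (· + ·) s ((PySem.List.pyRange 0 L 1).map (fun i =>
         (PySem.Int.ofStr? (PySem.List.pyGetD (PySem.List.pyGetD G j []) i "")).getD 0))) a,
       rs.foldl (fun s j => List.zipWith (· * ·) s ((PySem.List.pyRange 0 L 1).map (fun i =>
         (PySem.Int.ofStr? (PySem.List.pyGetD (PySem.List.pyGetD G j []) i "")).getD 0))) b) :=
  PySem.List.foldl_prod_mk
    (fun s j => List.zipWith (· + ·) s ((PySem.List.pyRange 0 L 1).map (fun i =>
       (PySem.Int.ofStr? (PySem.List.pyGetD (PySem.List.pyGetD G j []) i "")).getD 0)))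
    (fun s j => List.zipWith (· * ·) s ((PySem.List.pyRange 0 L 1).map (fun i =>
       (PySem.Int.ofStr? (PySem.List.pyGetD (PySem.List.pyGetD G j []) i "")).getD 0)))
    rs a b

lemma pv_prod_fold (rs : List Int) (f : Int → Int) :
    rs.foldl (fun a j => a * f j) 1 = (rs.map f).prod := by
  rw [List.prod_eq_foldl, List.foldl_map]

-- ===== VERDICT (by name: the statement is the Claim_ definition above) =====
theorem part_one_spec : Claim_equal_part_one := by
  intro data _ _
  unfold Spec_part_one part_one part_one_alt
  rw [pvGenerateGrid_eq]
  simp only []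
  set G := (PySem.Str.splitlines data).map PySem.Str.split₀ with hG
  set L := PySem.List.len (PySem.List.pyGetD G 0 []) with hL
  set D := PySem.List.len G with hD
  -- A side: inner append-loop is a map, outer loop is a sum of a map
  simp only [PySem.List.foldl_append_singleton_eq_map, List.nil_append]
  rw [pv_foldl_add_ite]
  -- B side: split the pair fold, turn it into per-column folds, then the final loop into a sum
  rw [pv_pair_fold]
  rw [pv_replicate_eq L 0, pv_replicate_eq L 1, pv_fold_col, pv_fold_col]
  rw [PySem.List.foldl_add, zero_add, zero_add]
  congr 1
  apply List.map_congr_left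
  intro i hi
  obtain ⟨h0, hiL⟩ := PySem.List.mem_pyRange_one.mp hi
  rw [PySem.List.pyGetD_map_pyRange_of_nonneg _ L i 0 h0 hiL,
      PySem.List.pyGetD_map_pyRange_of_nonneg _ L i 0 h0 hiL]
  simp only [PySem.List.foldl_add, zero_add, pv_prod_fold]
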